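-- pv_equiv track=rewrite | github.com/ChristianLempa/boilerplates | archetypes/__main__.py | _extract_repeat_sections
-- ===== SOURCE A (Python) =====
-- def _extract_repeat_sections(pattern: list[str]) -> list[tuple[int, int, list[str]]]:
--     """Extract repeat sections from a pattern.
--
--     Returns:
--         List of (start_idx, end_idx, section_content) tuples
--     """
--     sections = []
--     i = 0
--     while i < len(pattern):
--         if pattern[i] == "@REPEAT_START":
--             start = i + 1
--             depth = 1
--             j = i + 1
--             while j < len(pattern) and depth > 0:
--                 if pattern[j] == "@REPEAT_START":
--                     depth += 1
--                 elif pattern[j] == "@REPEAT_END":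
--                     depth -= 1
--                 j += 1
--             end = j - 1
--             sections.append((i, j, pattern[start:end]))
--             i = j
--         else:
--             i += 1
--     return sections
-- ===== SOURCE B (Python) =====
-- def _extract_repeat_sections(pattern: list[str]) -> list[tuple[int, int, list[str]]]:
--     """One stack pass recording (start, end) bounds per top-level section, then emit.
--
--     Each top-level section is recorded with a provisional end at the end of the
--     pattern when it opens; the real end is patched in when it closes. A section's
--     content is everything strictly between its two boundary tokens.
--     """
--     n = len(pattern)
--     bounds = []
--     stack = []
--     for i, tok in enumerate(pattern):
--         if tok == "@REPEAT_START":
--             if not stack: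
--                 bounds.append((i, n))
--             stack.append(i)
--         elif tok == "@REPEAT_END" and stack:
--             stack.pop()
--             if not stack:
--                 bounds[-1] = (bounds[-1][0], i + 1)
--     return [(s, e, pattern[s + 1:e - 1]) for s, e in bounds]
-- ===== Notes on version B (the rewrite author's own statement) =====
-- stated objective: faster
-- what changed: Replaces A's nested while loops (outer index scan plus inner matching-end scan with an i=j jump) with one stack-based pass over enumerate(pattern) that records (start, end) bounds per top-level section (provisional end = len(pattern), patched when the section closes) followed by a comprehension emitting the tuples.
import Mathlib
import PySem

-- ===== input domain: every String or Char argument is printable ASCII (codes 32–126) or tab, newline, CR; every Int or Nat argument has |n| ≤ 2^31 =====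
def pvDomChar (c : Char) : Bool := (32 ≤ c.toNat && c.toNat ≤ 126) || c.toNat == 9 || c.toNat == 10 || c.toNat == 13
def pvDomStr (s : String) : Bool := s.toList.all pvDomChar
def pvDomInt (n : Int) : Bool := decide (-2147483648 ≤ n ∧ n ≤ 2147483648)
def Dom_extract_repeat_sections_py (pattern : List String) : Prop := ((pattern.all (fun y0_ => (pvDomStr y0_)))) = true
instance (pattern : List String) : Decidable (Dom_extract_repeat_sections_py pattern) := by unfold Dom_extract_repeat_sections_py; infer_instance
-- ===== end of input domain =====

-- B replaces A's nested while loops with one stack pass that records per-top-level-section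
-- (start, end) bounds (provisional end = length, patched at close) and then emits the tuples.

-- ===== PORT A =====
-- inner 'while j < len(pattern) and depth > 0' loop of A; returns the final j.
-- fuel = pattern.length is a pure totality guard: the loop advances j by 1 each
-- iteration and is entered at j = i+1 ≥ 1, so at most pattern.length - 1 steps run.
def pvAInner (pattern : List String) (fuel : Nat) (j : Nat) (depth : Int) : Nat :=
  match fuel with
  | 0 => j
  | fuel + 1 =>
    if j < pattern.length ∧ depth > 0 then
      if pattern[j]! = "@REPEAT_START" then pvAInner pattern fuel (j+1) (depth+1)
      else if pattern[j]! = "@REPEAT_END" then pvAInner pattern fuel (j+1) (depth-1)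
      else pvAInner pattern fuel (j+1) depth
    else j

-- outer 'while i < len(pattern)' loop of A; fuel = pattern.length is again a pure
-- totality guard (i strictly increases each iteration)
def pvAOuter (pattern : List String) (fuel : Nat) (i : Nat) : List (Int × Int × List String) :=
  match fuel with
  | 0 => []
  | fuel + 1 =>
    if i < pattern.length then
      if pattern[i]! = "@REPEAT_START" then
        let j := pvAInner pattern pattern.length (i+1) 1
        ((i : Int), (j : Int), PySem.List.slice pattern (some ((i : Int) + 1)) (some ((j : Int) - 1)))
          :: pvAOuter pattern fuel j
      else pvAOuter pattern fuel (i+1)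
    else []

def extract_repeat_sections_py (pattern : List String) : List (Int × Int × List String) :=
  pvAOuter pattern pattern.length 0

-- ===== PORT B =====
-- one step of Source B's for-loop over enumerate(pattern); state = (bounds, stack)
-- (the Python list used as a stack push/pop-at-end is modelled as a Lean list with
-- push/pop at the head — the same stack discipline)
def pvBStep (pattern : List String)
    (st : List (Int × Int) × List Int) (ix : Int × String) :
    List (Int × Int) × List Int :=
  let (bounds, stack) := st
  let (i, tok) := ix
  if tok = "@REPEAT_START" then
    ((if stack = [] then bounds ++ [(i, (pattern.length : Int))] else bounds), i :: stack)
  else if tok = "@REPEAT_END" ∧ stack ≠ [] then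
    (if stack.tail = [] then bounds.dropLast ++ [((bounds.getLastD (0, 0)).1, i + 1)]
     else bounds, stack.tail)
  else (bounds, stack)

-- Source B's final comprehension over the recorded bounds
def pvEmit (pattern : List String) (bounds : List (Int × Int)) : List (Int × Int × List String) :=
  bounds.map (fun b => (b.1, b.2, PySem.List.slice pattern (some (b.1 + 1)) (some (b.2 - 1))))

def extract_repeat_sections_py_alt (pattern : List String) : List (Int × Int × List String) :=
  pvEmit pattern ((PySem.List.enumerate pattern).foldl (pvBStep pattern) ([], [])).1

-- ===== PRECONDITION & SPEC =====
def Spec_extract_repeat_sections_py (pattern : List String) (out : List (Int × Int × List String)) : Prop := out = extract_repeat_sections_py_alt pattern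
instance (pattern : List String) (out : List (Int × Int × List String)) : Decidable (Spec_extract_repeat_sections_py pattern out) := by unfold Spec_extract_repeat_sections_py; infer_instance

-- ===== CLAIM (what is proved, stated in full; the proofs are below) =====
def Claim_equal_extract_repeat_sections_py : Prop := ∀ (pattern : List String), Dom_extract_repeat_sections_py pattern → Spec_extract_repeat_sections_py pattern (extract_repeat_sections_py pattern)

-- ===== LEMMAS AND PROOFS =====

-- run B's fold on the enumeration suffix starting at index j, then emit
def pvBRest (pattern : List String) (j : Nat)
    (bounds : List (Int × Int)) (stack : List Int) : List (Int × Int × List String) :=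
  pvEmit pattern (((PySem.List.enumerate pattern).drop j).foldl (pvBStep pattern) (bounds, stack)).1

theorem pvEnum_drop_cons (pattern : List String) (j : Nat) (h : j < pattern.length) :
    (PySem.List.enumerate pattern).drop j
      = ((j : Int), pattern[j]) :: (PySem.List.enumerate pattern).drop (j+1) := by
  have hlen : j < (PySem.List.enumerate pattern).length := by
    simpa [PySem.List.length_enumerate] using h
  rw [List.drop_eq_getElem_cons hlen]
  congr 1
  rw [PySem.List.getElem_enumerate]
  simp

theorem pvBang (pattern : List String) (j : Nat) (h : j < pattern.length) :
    pattern[j]! = pattern[j] := getElem!_pos pattern j h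

-- B-side single-step unfolding lemmas
theorem pvB_step (pattern : List String) (j : Nat) (h : j < pattern.length)
    (bounds : List (Int × Int)) (stack : List Int) :
    pvBRest pattern j bounds stack
      = (let st := pvBStep pattern (bounds, stack) ((j : Int), pattern[j])
         pvBRest pattern (j+1) st.1 st.2) := by
  simp only [pvBRest, pvEnum_drop_cons pattern j h, List.foldl_cons]

theorem pvB_start (pattern : List String) (j : Nat) (h : j < pattern.length)
    (h1 : pattern[j] = "@REPEAT_START") (bounds : List (Int × Int)) (stack : List Int) :
    pvBRest pattern j bounds stack
      = pvBRest pattern (j+1)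
          (if stack = [] then bounds ++ [((j : Int), (pattern.length : Int))] else bounds)
          ((j : Int) :: stack) := by
  rw [pvB_step pattern j h]
  simp [pvBStep, h1]

theorem pvB_close (pattern : List String) (j : Nat) (h : j < pattern.length)
    (h1 : pattern[j] ≠ "@REPEAT_START") (h2 : pattern[j] = "@REPEAT_END")
    (x : Int) (bounds : List (Int × Int)) :
    pvBRest pattern j bounds [x]
      = pvBRest pattern (j+1) (bounds.dropLast ++ [((bounds.getLastD (0, 0)).1, (j : Int) + 1)]) [] := by
  rw [pvB_step pattern j h]
  simp [pvBStep, h1, h2]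

theorem pvB_pop (pattern : List String) (j : Nat) (h : j < pattern.length)
    (h1 : pattern[j] ≠ "@REPEAT_START") (h2 : pattern[j] = "@REPEAT_END")
    (x y : Int) (ys : List Int) (bounds : List (Int × Int)) :
    pvBRest pattern j bounds (x :: y :: ys) = pvBRest pattern (j+1) bounds (y :: ys) := by
  rw [pvB_step pattern j h]
  simp [pvBStep, h1, h2]

theorem pvB_skip_end (pattern : List String) (j : Nat) (h : j < pattern.length)
    (h1 : pattern[j] ≠ "@REPEAT_START") (h2 : pattern[j] = "@REPEAT_END")
    (bounds : List (Int × Int)) :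
    pvBRest pattern j bounds [] = pvBRest pattern (j+1) bounds [] := by
  rw [pvB_step pattern j h]
  simp [pvBStep, h1, h2]

theorem pvB_other (pattern : List String) (j : Nat) (h : j < pattern.length)
    (h1 : pattern[j] ≠ "@REPEAT_START") (h2 : pattern[j] ≠ "@REPEAT_END")
    (bounds : List (Int × Int)) (stack : List Int) :
    pvBRest pattern j bounds stack = pvBRest pattern (j+1) bounds stack := by
  rw [pvB_step pattern j h]
  simp [pvBStep, h1, h2]

theorem pvBRest_empty (pattern : List String) (j : Nat) (h : pattern.length ≤ j)
    (bounds : List (Int × Int)) (stack : List Int) :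
    pvBRest pattern j bounds stack = pvEmit pattern bounds := by
  have hnil : (PySem.List.enumerate pattern).drop j = [] := by
    apply List.drop_eq_nil_of_le
    simpa [PySem.List.length_enumerate] using h
  simp [pvBRest, hnil]

-- A-side lemmas for the fuel-based inner loop
theorem pvAInner_ge (pattern : List String) (fuel j : Nat) (depth : Int) :
    j ≤ pvAInner pattern fuel j depth := by
  induction fuel generalizing j depth with
  | zero => simp [pvAInner]
  | succ f ih =>
    rw [pvAInner]
    split
    · split
      · exact le_trans (by omega) (ih (j+1) _)
      · split
        · exact le_trans (by omega) (ih (j+1) _)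
        · exact le_trans (by omega) (ih (j+1) _)
    · omega

theorem pvA_start (pattern : List String) (f j : Nat) (h : j < pattern.length)
    (h1 : pattern[j] = "@REPEAT_START") (d : Int) (hd : 0 < d) :
    pvAInner pattern (f+1) j d = pvAInner pattern f (j+1) (d+1) := by
  rw [pvAInner, if_pos ⟨h, hd⟩, pvBang pattern j h, h1, if_pos rfl]

theorem pvA_end (pattern : List String) (f j : Nat) (h : j < pattern.length)
    (h1 : pattern[j] ≠ "@REPEAT_START") (h2 : pattern[j] = "@REPEAT_END") (d : Int) (hd : 0 < d) :
    pvAInner pattern (f+1) j d = pvAInner pattern f (j+1) (d-1) := by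
  rw [pvAInner, if_pos ⟨h, hd⟩, pvBang pattern j h, h2]
  simp [h1]

theorem pvA_other (pattern : List String) (f j : Nat) (h : j < pattern.length)
    (h1 : pattern[j] ≠ "@REPEAT_START") (h2 : pattern[j] ≠ "@REPEAT_END") (d : Int) (hd : 0 < d) :
    pvAInner pattern (f+1) j d = pvAInner pattern f (j+1) d := by
  rw [pvAInner, if_pos ⟨h, hd⟩, pvBang pattern j h]
  simp [h1, h2]

theorem pvA_stop (pattern : List String) (f j : Nat) (d : Int)
    (h : ¬ (j < pattern.length ∧ 0 < d)) : pvAInner pattern f j d = j := by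
  cases f with
  | zero => rw [pvAInner]
  | succ f => rw [pvAInner, if_neg h]

-- B's pass with a nonempty stack tracks A's inner loop: at A's exit index j' the
-- provisional bound (s, length) has been patched to (s, j') — also when the loop
-- runs off the end, since then j' = length
theorem pvBRest_inner (pattern : List String) (f j : Nat) (hj : j ≤ pattern.length)
    (hf : pattern.length ≤ j + f)
    (stk : List Int) (hstk : stk ≠ []) (done : List (Int × Int)) (s : Int) :
    pvBRest pattern j (done ++ [(s, (pattern.length : Int))]) stk
      = pvBRest pattern (pvAInner pattern f j (stk.length : Int)) (done ++ [(s, ((pvAInner pattern f j (stk.length : Int) : Nat) : Int))]) [] := by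
  induction f generalizing j stk with
  | zero =>
    have hjn : j = pattern.length := by omega
    rw [pvA_stop pattern 0 j _ (by omega), pvBRest_empty pattern j (by omega),
      pvBRest_empty pattern j (by omega), hjn]
  | succ f ih =>
    have hd : (0:Int) < (stk.length : Int) := by
      cases stk with
      | nil => exact absurd rfl hstk
      | cons a as => exact_mod_cast Nat.succ_pos as.length
    by_cases h : j < pattern.length
    · by_cases h1 : pattern[j] = "@REPEAT_START"
      · rw [pvA_start pattern f j h h1 _ hd, pvB_start pattern j h h1, if_neg hstk]
        have := ih (j+1) (by omega) (by omega) ((j : Int) :: stk) (by simp)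
        simpa [List.length_cons] using this
      · by_cases h2 : pattern[j] = "@REPEAT_END"
        · rw [pvA_end pattern f j h h1 h2 _ hd]
          cases stk with
          | nil => exact absurd rfl hstk
          | cons x xs =>
            cases xs with
            | nil =>
              rw [pvB_close pattern j h h1 h2 x]
              have hstop : pvAInner pattern f (j+1) ((([x] : List Int).length : Int) - 1) = j + 1 := by
                apply pvA_stop; simp
              rw [hstop]
              simp
            | cons y ys =>
              rw [pvB_pop pattern j h h1 h2 x y ys]
              have := ih (j+1) (by omega) (by omega) (y :: ys) (by simp)
              have hlen : ((y :: ys : List Int).length : Int) = ((x :: y :: ys : List Int).length : Int) - 1 := by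
                push_cast [List.length_cons]; omega
              rw [hlen] at this
              exact this
        · rw [pvA_other pattern f j h h1 h2 _ hd, pvB_other pattern j h h1 h2]
          exact ih (j+1) (by omega) (by omega) stk hstk
    · have hjn : j = pattern.length := by omega
      rw [pvA_stop pattern (f+1) j _ (by omega), pvBRest_empty pattern j (by omega),
        pvBRest_empty pattern j (by omega), hjn]

-- main correspondence: from an empty stack, B's pass-then-emit produces A's outer-loop output
theorem pvBRest_outer (pattern : List String) (f i : Nat) (hf : pattern.length ≤ i + f)
    (bounds : List (Int × Int)) :
    pvBRest pattern i bounds [] = pvEmit pattern bounds ++ pvAOuter pattern f i := by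
  induction f generalizing i bounds with
  | zero =>
    rw [pvBRest_empty pattern i (by omega), pvAOuter]
    simp
  | succ f ih =>
    rw [pvAOuter]
    by_cases h : i < pattern.length
    · by_cases h1 : pattern[i] = "@REPEAT_START"
      · rw [if_pos h, pvBang pattern i h, if_pos h1,
          pvB_start pattern i h h1, if_pos rfl]
        have hinner := pvBRest_inner pattern pattern.length (i+1) (by omega) (by omega)
          [(i : Int)] (by simp) bounds (i : Int)
        simp only [List.length_cons, List.length_nil] at hinner
        norm_num at hinner
        rw [hinner]
        rw [ih (pvAInner pattern pattern.length (i+1) 1)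
          (by have := pvAInner_ge pattern pattern.length (i+1) 1; omega)]
        simp [pvEmit]
      · rw [if_pos h, pvBang pattern i h, if_neg h1]
        by_cases h2 : pattern[i] = "@REPEAT_END"
        · rw [pvB_skip_end pattern i h h1 h2]
          exact ih (i+1) (by omega) bounds
        · rw [pvB_other pattern i h h1 h2]
          exact ih (i+1) (by omega) bounds
    · rw [if_neg h, pvBRest_empty pattern i (by omega)]
      simp

-- ===== VERDICT (by name: the statement is the Claim_ definition above) =====
theorem extract_repeat_sections_py_spec : Claim_equal_extract_repeat_sections_py := by
  intro pattern _
  unfold Spec_extract_repeat_sections_py extract_repeat_sections_py extract_repeat_sections_py_alt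
  have h := pvBRest_outer pattern pattern.length 0 (by omega) []
  simpa [pvBRest, pvEmit] using h.symm
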